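-- pv_equiv track=rewrite | github.com/alin-c/propositions | propositions.py | get_proposition_type
-- ===== SOURCE A (Python) =====
-- def get_proposition_type(table):
--     """
--     Determines the proposition type.
--     """
--     last_column = []
--     j = len(table[1]) - 1
--     for i in range(1, len(table)):
--         last_column += [table[i][j]]
--
--     result = ""
--     if False not in last_column:
--         result = "valid (tautology, also satisfiable)"
--     elif True not in last_column:
--         result = "contradiction (unsatisfiable)"
--     elif True in last_column:
--         result = "satisfiable"  # never displayed... :)
--         if False in last_column:
--             result = "contingent (also satisfiable)"
--
--     return result
-- ===== SOURCE B (Python) =====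
-- def get_proposition_type(table):
--     """
--     Determines the proposition type.
--     """
--     j = len(table[1]) - 1
--     seen_false = False
--     seen_true = False
--     for i in range(1, len(table)):
--         v = table[i][j]
--         seen_false = seen_false or v == False
--         seen_true = seen_true or v == True
--     if not seen_false:
--         return "valid (tautology, also satisfiable)"
--     if not seen_true:
--         return "contradiction (unsatisfiable)"
--     return "contingent (also satisfiable)"
-- ===== Notes on version B (the rewrite author's own statement) =====
-- stated objective: simpler
-- what changed: B never materialises the last-column list: it keeps two booleans (seen_false/seen_true) in one pass over the rows and classifies with three early returns instead of list-building plus repeated 'in' membership scans.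
import Mathlib
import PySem

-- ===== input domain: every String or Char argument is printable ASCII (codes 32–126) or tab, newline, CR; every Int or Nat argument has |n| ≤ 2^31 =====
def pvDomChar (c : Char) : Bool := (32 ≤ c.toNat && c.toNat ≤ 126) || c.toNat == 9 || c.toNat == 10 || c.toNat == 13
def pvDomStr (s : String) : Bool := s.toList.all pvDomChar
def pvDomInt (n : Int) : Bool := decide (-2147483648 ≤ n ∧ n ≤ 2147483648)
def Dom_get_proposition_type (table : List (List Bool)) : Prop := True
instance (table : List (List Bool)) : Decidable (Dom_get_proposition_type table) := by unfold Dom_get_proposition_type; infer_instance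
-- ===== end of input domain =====

-- B replaces A's last-column list and repeated `in` scans by one pass keeping two booleans; return value only.


-- ===== PORT A =====
def get_proposition_type (table : List (List Bool)) : String :=
  let j : Int := (((PySem.List.pyGet? table 1).getD []).length : Int) - 1
  let last_column : List (Option Bool) :=
    (PySem.List.pyRange 1 (table.length) 1).foldl
      (fun acc i => acc ++ [(PySem.List.pyGet? table i).bind (fun row => PySem.List.pyGet? row j)]) []
  if some false ∉ last_column then "valid (tautology, also satisfiable)"
  else if some true ∉ last_column then "contradiction (unsatisfiable)"
  else if some true ∈ last_column then
    (if some false ∈ last_column then "contingent (also satisfiable)" else "satisfiable")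
  else ""

-- ===== PORT B =====
def get_proposition_type_alt (table : List (List Bool)) : String :=
  let j : Int := (((PySem.List.pyGet? table 1).getD []).length : Int) - 1
  let st : Bool × Bool :=
    (PySem.List.pyRange 1 (table.length) 1).foldl
      (fun p i =>
        match (PySem.List.pyGet? table i).bind (fun row => PySem.List.pyGet? row j) with
        | some v => (p.1 || (v == false), p.2 || (v == true))
        | none => p)
      (false, false)
  if !st.1 then "valid (tautology, also satisfiable)"
  else if !st.2 then "contradiction (unsatisfiable)"
  else "contingent (also satisfiable)"

-- ===== PRECONDITION & SPEC =====
-- Pre_ excludes exactly the inputs where the Python raises IndexError: tables with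
-- fewer than 2 rows (table[1]), or a data row on which table[i][j] is out of range.
def Pre_get_proposition_type (table : List (List Bool)) : Prop :=
  2 ≤ table.length ∧
  ∀ row ∈ table.tail,
    (PySem.List.pyGet? row ((((PySem.List.pyGet? table 1).getD []).length : Int) - 1)).isSome
instance (table : List (List Bool)) : Decidable (Pre_get_proposition_type table) := by
  unfold Pre_get_proposition_type; infer_instance
def pvWitness_get_proposition_type : List (List Bool) := [[true], [true], [false]]
def Spec_get_proposition_type (table : List (List Bool)) (out : String) : Prop := out = get_proposition_type_alt table
instance (table : List (List Bool)) (out : String) : Decidable (Spec_get_proposition_type table out) := by unfold Spec_get_proposition_type; infer_instance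

-- ===== CLAIM (what is proved, stated in full; the proofs are below) =====
def Claim_equal_get_proposition_type : Prop := ∀ (table : List (List Bool)), Dom_get_proposition_type table → Pre_get_proposition_type table → Spec_get_proposition_type table (get_proposition_type table)

-- ===== LEMMAS AND PROOFS =====
theorem pvFoldlSnoc (f : Int → Option Bool) :
    ∀ (l : List Int) (acc : List (Option Bool)),
      l.foldl (fun a i => a ++ [f i]) acc = acc ++ l.map f := by
  intro l
  induction l with
  | nil => simp
  | cons x xs ih => intro acc; simp [List.foldl, ih]

theorem pvFoldlPair (f : Int → Option Bool) :
    ∀ (l : List Int) (b1 b2 : Bool),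
      l.foldl
        (fun p i =>
          match f i with
          | some v => (p.1 || (v == false), p.2 || (v == true))
          | none => p)
        (b1, b2)
      = (b1 || decide (some false ∈ l.map f), b2 || decide (some true ∈ l.map f)) := by
  intro l
  induction l with
  | nil => simp
  | cons x xs ih =>
    intro b1 b2
    cases h : f x with
    | none => simp only [List.foldl_cons, h]; rw [ih]; simp [h]
    | some v => simp only [List.foldl_cons, h]; rw [ih]; cases v <;> simp [h]

-- ===== VERDICT (by name: the statement is the Claim_ definition above) =====
theorem get_proposition_type_spec : Claim_equal_get_proposition_type := by
  intro table _ _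
  unfold Spec_get_proposition_type get_proposition_type get_proposition_type_alt
  simp only [pvFoldlSnoc, pvFoldlPair, List.nil_append]
  set xs := ((PySem.List.pyRange 1 (table.length) 1).map
    (fun i => (PySem.List.pyGet? table i).bind
      (fun row => PySem.List.pyGet? row ((((PySem.List.pyGet? table 1).getD []).length : Int) - 1))))
  by_cases hf : some false ∈ xs <;> by_cases ht : some true ∈ xs <;> simp [hf, ht]
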